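-- pv_equiv track=rewrite | github.com/suyash754/LP4 | Quest for the hidden case.PY | longest_common_substring_ascii_sum
-- ===== SOURCE A (Python) =====
-- def longest_common_substring_ascii_sum(s1, s2):
--     max_length = 0
--     ascii_sum = 0
--
--     for i in range(len(s1)):
--         for j in range(len(s2)):
--             # Determine the longest common substring starting at s1[i] and s2[j]
--             k = 0
--             while i + k < len(s1) and j + k < len(s2) and s1[i + k] == s2[j + k]:
--                 k += 1
--
--             # Update max_length and ascii_sum if we found a longer common substring
--             if k > max_length:
--                 max_length = k
--                 ascii_sum = sum(ord(char) for char in s1[i:i + k])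
--
--     return ascii_sum
-- ===== SOURCE B (Python) =====
-- def longest_common_substring_ascii_sum(s1, s2):
--     n, m = len(s1), len(s2)
--     # run-length table: rows[i][j] = length of common run starting at s1[i], s2[j]
--     rows = []
--     nxt = [0] * (m + 1)
--     for i in range(n - 1, -1, -1):
--         row = [nxt[j + 1] + 1 if s1[i] == s2[j] else 0 for j in range(m)]
--         rows.append(row)
--         nxt = row + [0]
--     rows.reverse()
--     best = max((v for row in rows for v in row), default=0)
--     if best == 0:
--         return 0
--     i = next(i for i, row in enumerate(rows) if best in row)
--     return sum(ord(c) for c in s1[i:i + best])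
-- ===== Notes on version B (the rewrite author's own statement) =====
-- stated objective: faster
-- what changed: A extends a match with a while loop for every start pair (i,j); B builds the run-length table in one backward pass (row[j] = next_row[j+1]+1 on a match), takes its global maximum, and sums the slice at the first row containing it.
import Mathlib
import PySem

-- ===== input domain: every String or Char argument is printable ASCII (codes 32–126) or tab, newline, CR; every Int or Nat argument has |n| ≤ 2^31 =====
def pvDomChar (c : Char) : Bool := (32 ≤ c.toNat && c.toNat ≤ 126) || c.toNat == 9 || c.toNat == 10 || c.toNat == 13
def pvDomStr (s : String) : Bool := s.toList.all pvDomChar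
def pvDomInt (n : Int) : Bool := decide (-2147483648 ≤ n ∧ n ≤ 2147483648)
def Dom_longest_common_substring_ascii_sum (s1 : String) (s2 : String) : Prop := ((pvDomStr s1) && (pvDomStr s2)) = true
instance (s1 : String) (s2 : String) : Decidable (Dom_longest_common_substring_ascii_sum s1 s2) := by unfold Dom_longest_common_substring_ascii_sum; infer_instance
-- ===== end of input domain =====

-- B replaces A's per-start-pair while-loop extension by a run-length DP table built in one
-- backward pass plus a global max and a first-matching-row search; objective: faster.

-- ===== PORT A =====

-- A's inner `while i+k < len(s1) and j+k < len(s2) and s1[i+k] == s2[j+k]: k += 1`,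
-- run on the suffixes s1[i:], s2[j:]: structural recursion over the same comparisons.
def pvRunLen : List Char → List Char → Nat
  | x :: xs, y :: ys => if x = y then pvRunLen xs ys + 1 else 0
  | _, _ => 0

-- sum(ord(char) for char in l)
def pvAsciiSum (l : List Char) : Int := (l.map (fun c => (c.toNat : Int))).sum

def longest_common_substring_ascii_sum (s1 : String) (s2 : String) : Int :=
  let a := s1.toList
  let b := s2.toList
  -- state (max_length, ascii_sum); s1[i:i+k] = (a.drop i).take k for the Nat indices used here
  ((List.range a.length).foldl (fun st i =>
      (List.range b.length).foldl (fun (st : Nat × Int) j =>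
        let k := pvRunLen (a.drop i) (b.drop j)
        if st.1 < k then (k, pvAsciiSum ((a.drop i).take k)) else st) st)
    ((0, 0) : Nat × Int)).2

-- ===== PORT B =====

-- row = [nxt[j+1] + 1 if s1[i] == s2[j] else 0 for j in range(m)]  (ns is nxt without its head)
def pvRowFor (c : Char) : List Char → List Nat → List Nat
  | y :: ys, ns => (if c = y then ns.headD 0 + 1 else 0) :: pvRowFor c ys ns.tail
  | [], _ => []

-- the loop `for i in range(n-1, -1, -1)` building the rows bottom-up (in increasing-i order);
-- nxt = previous row + [0], initially [0]*(m+1) (= replicate m 0 ++ [0])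
def pvRows : List Char → List Char → List (List Nat)
  | [], _ => []
  | c :: rest, b =>
    let rs := pvRows rest b
    let nxt : List Nat := rs.headD (List.replicate b.length 0) ++ [0]
    pvRowFor c b nxt.tail :: rs

def longest_common_substring_ascii_sum_alt (s1 : String) (s2 : String) : Int :=
  let a := s1.toList
  let b := s2.toList
  let rows := pvRows a b
  let best := rows.flatten.foldl max 0    -- max(generator, default=0)
  if best = 0 then 0
  else
    -- next(i for i, row in enumerate(rows) if best in row); s1[i:i+best]
    pvAsciiSum ((a.drop (rows.findIdx (fun row => row.contains best))).take best)

-- ===== PRECONDITION & SPEC =====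
def Spec_longest_common_substring_ascii_sum (s1 : String) (s2 : String) (out : Int) : Prop := out = longest_common_substring_ascii_sum_alt s1 s2
instance (s1 : String) (s2 : String) (out : Int) : Decidable (Spec_longest_common_substring_ascii_sum s1 s2 out) := by unfold Spec_longest_common_substring_ascii_sum; infer_instance

-- ===== CLAIM (what is proved, stated in full; the proofs are below) =====
def Claim_equal_longest_common_substring_ascii_sum : Prop := ∀ (s1 : String) (s2 : String), Dom_longest_common_substring_ascii_sum s1 s2 → Spec_longest_common_substring_ascii_sum s1 s2 (longest_common_substring_ascii_sum s1 s2)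

-- ===== LEMMAS AND PROOFS =====

lemma pvRunLen_nil_right (x : List Char) : pvRunLen x [] = 0 := by cases x <;> rfl

lemma tail_getD (l : List Nat) (j : Nat) : l.tail.getD j 0 = l.getD (j + 1) 0 := by
  cases l <;> simp

lemma append_zero_getD (l : List Nat) (i : Nat) : (l ++ [0]).getD i 0 = l.getD i 0 := by
  induction l generalizing i with
  | nil => cases i <;> simp [List.getD]
  | cons x t ih => cases i with
    | zero => rfl
    | succ k => simpa using ih k

lemma map_range_getD (m : Nat) (f : Nat → Nat) (i : Nat) :
    ((List.range m).map f).getD i 0 = if i < m then f i else 0 := by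
  by_cases h : i < m
  · simp [h, List.getD]
  · simp [h, List.getD]

-- the row built by pvRowFor, pointwise
lemma pvRowFor_eq (c : Char) (rest : List Char) :
    ∀ (b : List Char) (ns : List Nat),
      (∀ j, ns.getD j 0 = pvRunLen rest (b.drop (j + 1))) →
      pvRowFor c b ns = (List.range b.length).map (fun j => pvRunLen (c :: rest) (b.drop j)) := by
  intro b
  induction b with
  | nil => intro ns _; rfl
  | cons y ys ih =>
    intro ns h
    have htail : ∀ j, ns.tail.getD j 0 = pvRunLen rest (ys.drop (j + 1)) := by
      intro j; rw [tail_getD, h (j + 1)]; rfl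
    have hhead : ns.headD 0 = pvRunLen rest ys := by
      have : ns.headD 0 = ns.getD 0 0 := by cases ns <;> rfl
      rw [this, h 0]; rfl
    show (if c = y then ns.headD 0 + 1 else 0) :: pvRowFor c ys ns.tail = _
    rw [List.length_cons, List.range_succ_eq_map, List.map_cons, List.map_map, ih ns.tail htail,
      hhead]
    rfl

-- characterization of the whole table
lemma pvRows_eq : ∀ (a b : List Char),
    pvRows a b = (List.range a.length).map (fun i =>
      (List.range b.length).map (fun j => pvRunLen (a.drop i) (b.drop j))) := by
  intro a
  induction a with
  | nil => intro b; rfl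
  | cons c rest ih =>
    intro b
    have hns : ∀ j, (((pvRows rest b).headD (List.replicate b.length 0) ++ [0]).tail).getD j 0
        = pvRunLen rest (b.drop (j + 1)) := by
      intro j
      rw [tail_getD, append_zero_getD]
      cases rest with
      | nil =>
        show (List.replicate b.length 0).getD (j + 1) 0 = pvRunLen [] (b.drop (j + 1))
        by_cases hj : j + 1 < b.length
        · rw [List.getD_eq_getElem?_getD, List.getElem?_replicate, if_pos hj]; rfl
        · rw [List.getD_eq_getElem?_getD, List.getElem?_replicate, if_neg hj]; rfl
      | cons c' t =>
        rw [ih b]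
        rw [List.length_cons, List.range_succ_eq_map, List.map_cons, List.headD_cons]
        show ((List.range b.length).map (fun j => pvRunLen (List.drop 0 (c' :: t)) (List.drop j b))).getD (j + 1) 0 = _
        rw [map_range_getD]
        by_cases hj : j + 1 < b.length
        · rw [if_pos hj]; rfl
        · rw [if_neg hj, List.drop_eq_nil_of_le (by omega), pvRunLen_nil_right]
    have hhd := pvRowFor_eq c rest b (((pvRows rest b).headD (List.replicate b.length 0) ++ [0]).tail) hns
    show pvRowFor c b (((pvRows rest b).headD (List.replicate b.length 0) ++ [0]).tail) :: pvRows rest b = _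
    rw [hhd, List.length_cons, List.range_succ_eq_map, List.map_cons, ih b, List.map_map]
    rfl

-- generic first-strict-improvement fold (the shape of A's update `if k > max_length: …`)
def pvSel {α : Type} (v : α → Nat) (g : α → Int) (l : List α) (st : Nat × Int) : Nat × Int :=
  l.foldl (fun st x => if st.1 < v x then (v x, g x) else st) st

def pvMaxv {α : Type} (v : α → Nat) (l : List α) : Nat := (l.map v).foldl max 0

lemma foldl_max_shift : ∀ (l : List Nat) (a : Nat), l.foldl max a = max a (l.foldl max 0) := by
  intro l
  induction l with
  | nil => intro a; simp
  | cons x t ih => intro a; simp only [List.foldl_cons, ih (max a x), ih (max 0 x)]; omega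

lemma pvMaxv_cons {α : Type} (v : α → Nat) (x : α) (t : List α) :
    pvMaxv v (x :: t) = max (v x) (pvMaxv v t) := by
  unfold pvMaxv
  rw [List.map_cons, List.foldl_cons, foldl_max_shift]
  omega

lemma le_pvMaxv_of_mem {α : Type} (v : α → Nat) {x : α} {l : List α} (h : x ∈ l) :
    v x ≤ pvMaxv v l := by
  induction l with
  | nil => simp at h
  | cons y t ih =>
    rw [pvMaxv_cons]
    rcases List.mem_cons.mp h with rfl | h
    · omega
    · have := ih h; omega

lemma pvSel_le {α : Type} (v : α → Nat) (g : α → Int) :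
    ∀ (l : List α) (st : Nat × Int), (∀ x ∈ l, v x ≤ st.1) → pvSel v g l st = st := by
  intro l
  induction l with
  | nil => intro st _; rfl
  | cons x t ih =>
    intro st h
    show pvSel v g t (if st.1 < v x then (v x, g x) else st) = st
    rw [if_neg (by have := h x (by simp); omega)]
    exact ih st (fun y hy => h y (by simp [hy]))

lemma pvSel_max {α : Type} (v : α → Nat) (g : α → Int) :
    ∀ (l : List α) (b : Nat) (s : Int) (M : Nat), pvMaxv v l = M → b < M →
      ∃ x, l.find? (fun y => v y == M) = some x ∧ v x = M ∧ pvSel v g l (b, s) = (M, g x) := by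
  intro l
  induction l with
  | nil => intro b s M hM hb; simp [pvMaxv] at hM; omega
  | cons x t ih =>
    intro b s M hM hb
    rw [pvMaxv_cons] at hM
    by_cases hx : pvMaxv v t ≤ v x
    · have hvx : v x = M := by omega
      refine ⟨x, ?_, hvx, ?_⟩
      · rw [List.find?_cons_of_pos (by simp [hvx])]
      · show pvSel v g t (if b < v x then (v x, g x) else (b, s)) = (M, g x)
        rw [if_pos (by omega)]
        rw [pvSel_le v g t (v x, g x) (fun y hy => le_trans (le_pvMaxv_of_mem v hy) hx), hvx]
    · have hvx : v x < M := by omega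
      have hMt : pvMaxv v t = M := by omega
      have hfind : List.find? (fun y => v y == M) (x :: t) = List.find? (fun y => v y == M) t :=
        List.find?_cons_of_neg (by simp; omega)
      set st' := if b < v x then (v x, g x) else (b, s) with hst'
      have hlt : st'.1 < M := by
        rw [hst']; split <;> simp <;> omega
      obtain ⟨x₀, hf, hv, hs⟩ := ih st'.1 st'.2 M hMt hlt
      exact ⟨x₀, by rw [hfind]; exact hf, hv, by show pvSel v g t st' = _; rw [← hs]⟩

-- A's nested loops as a single fold over the lexicographic pair list
lemma nested_eq_pairs {σ : Type} (f : σ → Nat × Nat → σ) (m : Nat) :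
    ∀ (n : Nat) (init : σ),
      (List.range n).foldl (fun st i => (List.range m).foldl (fun st j => f st (i, j)) st) init
        = ((List.range n).flatMap (fun i => (List.range m).map (fun j => (i, j)))).foldl f init := by
  intro n
  induction n with
  | zero => intro init; rfl
  | succ k ih =>
    intro init
    rw [List.range_succ, List.foldl_append, List.flatMap_append, List.foldl_append, ih]
    simp [List.foldl_map]

-- the first pair reaching M (in lex order) sits in the first row containing M
lemma find_split {m M : Nat} (v : Nat × Nat → Nat) :
    ∀ (l : List Nat) (x₀ : Nat × Nat),
      (l.flatMap (fun i => (List.range m).map (fun j => (i, j)))).find? (fun p => v p == M) = some x₀ →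
      ∃ p q, l = p ++ x₀.1 :: q ∧
        (∀ i ∈ p, ((List.range m).map (fun j => v (i, j))).contains M = false) ∧
        ((List.range m).map (fun j => v (x₀.1, j))).contains M = true := by
  intro l
  induction l with
  | nil => intro x₀ h; simp at h
  | cons i t ih =>
    intro x₀ h
    rw [List.flatMap_cons, List.find?_append] at h
    cases hseg : ((List.range m).map (fun j => (i, j))).find? (fun p => v p == M) with
    | some y =>
      rw [hseg] at h
      have hyx : y = x₀ := by simpa [Option.orElse] using h
      subst hyx
      have hmem := List.mem_of_find?_eq_some hseg
      have hpred := List.find?_some hseg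
      obtain ⟨j₀, hj₀, rfl⟩ := List.mem_map.mp hmem
      refine ⟨[], t, rfl, by simp, ?_⟩
      simp only [List.contains_eq_mem, decide_eq_true_eq]
      exact List.mem_map.mpr ⟨j₀, hj₀, by simpa using hpred⟩
    | none =>
      rw [hseg] at h
      have h : (t.flatMap (fun i => (List.range m).map (fun j => (i, j)))).find? (fun p => v p == M) = some x₀ := by
        simpa [Option.orElse] using h
      obtain ⟨p, q, hl, hp, hx⟩ := ih x₀ h
      refine ⟨i :: p, q, by rw [hl]; rfl, ?_, hx⟩
      intro i' hi'
      rcases List.mem_cons.mp hi' with rfl | hi'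
      · simp only [List.contains_eq_mem, decide_eq_false_iff_not]
        intro hmem
        obtain ⟨j₀, hj₀, hv⟩ := List.mem_map.mp hmem
        have := List.find?_eq_none.mp hseg (i', j₀) (List.mem_map.mpr ⟨j₀, hj₀, rfl⟩)
        simp [hv] at this
      · exact hp i' hi'

lemma findIdx_split {M : Nat} (rows₁ rows₂ : List (List Nat)) (r : List Nat)
    (hp : ∀ row ∈ rows₁, row.contains M = false) (hr : r.contains M = true) :
    (rows₁ ++ r :: rows₂).findIdx (fun row => row.contains M) = rows₁.length := by
  induction rows₁ with
  | nil => rw [List.nil_append, List.findIdx_cons, hr]; rfl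
  | cons a t ih =>
    rw [List.cons_append, List.findIdx_cons, hp a (by simp), cond_false,
      ih (fun row hrow => hp row (by simp [hrow]))]
    rfl

lemma range_split_length {n k : Nat} {p q : List Nat} (h : List.range n = p ++ k :: q) :
    p.length = k := by
  have hlen : p.length < n := by
    have := congrArg List.length h
    simp at this
    omega
  have h1 : (List.range n)[p.length]? = some k := by
    rw [h, List.getElem?_append_right (le_refl p.length)]
    simp
  rw [List.getElem?_range hlen] at h1
  exact (Option.some_inj.mp h1)

-- ===== VERDICT (by name: the statement is the Claim_ definition above) =====
theorem longest_common_substring_ascii_sum_spec : Claim_equal_longest_common_substring_ascii_sum := by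
  intro s1 s2 _
  unfold Spec_longest_common_substring_ascii_sum
  set a := s1.toList with ha
  set b := s2.toList with hb
  set n := a.length
  set m := b.length
  set v : Nat × Nat → Nat := fun p => pvRunLen (a.drop p.1) (b.drop p.2) with hv
  set g : Nat × Nat → Int := fun p => pvAsciiSum ((a.drop p.1).take (v p)) with hg
  set pairs : List (Nat × Nat) := (List.range n).flatMap (fun i => (List.range m).map (fun j => (i, j))) with hpairs
  have hA : longest_common_substring_ascii_sum s1 s2 = (pvSel v g pairs ((0 : Nat), (0 : Int))).2 :=
    congrArg Prod.snd (nested_eq_pairs (fun st p => if st.1 < v p then (v p, g p) else st) m n ((0 : Nat), (0 : Int)))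
  have hrows : pvRows a b = (List.range n).map (fun i => (List.range m).map (fun j => v (i, j))) :=
    pvRows_eq a b
  have hflat : (pvRows a b).flatten = pairs.map v := by
    rw [hrows, hpairs]
    rw [List.map_flatMap]
    rw [List.flatMap_def]
    simp only [List.map_map]
    rfl
  have hbest : (pvRows a b).flatten.foldl max 0 = pvMaxv v pairs := by
    rw [hflat]; rfl
  have hB : longest_common_substring_ascii_sum_alt s1 s2 =
      (if pvMaxv v pairs = 0 then 0
       else pvAsciiSum ((a.drop ((pvRows a b).findIdx (fun row => row.contains (pvMaxv v pairs)))).take (pvMaxv v pairs))) := by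
    show (if (pvRows a b).flatten.foldl max 0 = 0 then (0 : Int)
       else pvAsciiSum ((a.drop ((pvRows a b).findIdx (fun row => row.contains ((pvRows a b).flatten.foldl max 0)))).take ((pvRows a b).flatten.foldl max 0))) = _
    rw [hbest]
  rw [hA, hB]
  by_cases hM0 : pvMaxv v pairs = 0
  · rw [if_pos hM0]
    rw [pvSel_le v g pairs (0, 0) (fun x hx => by
      have := le_pvMaxv_of_mem v hx; omega)]
  · rw [if_neg hM0]
    obtain ⟨x₀, hfind, hvx₀, hsel⟩ := pvSel_max v g pairs 0 0 (pvMaxv v pairs) rfl (by omega)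
    rw [hsel]
    obtain ⟨p, q, hsplitl, hp, hx⟩ := find_split v (List.range n) x₀ (by rw [← hpairs]; exact hfind)
    have hidx : (pvRows a b).findIdx (fun row => row.contains (pvMaxv v pairs)) = x₀.1 := by
      rw [hrows, hsplitl, List.map_append, List.map_cons]
      rw [findIdx_split _ _ _ (by
        intro row hrow
        obtain ⟨i, hi, rfl⟩ := List.mem_map.mp hrow
        exact hp i hi) hx]
      rw [List.length_map]
      exact range_split_length hsplitl
    rw [hidx]
    show (pvMaxv v pairs, g x₀).2 = _
    rw [hg]
    simp only [hvx₀]
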